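-- pv_equiv track=rewrite | github.com/eldad1221/Open_u_python_course | mmn12.py | num_distance
-- ===== SOURCE A (Python) =====
-- def num_distance(lst, num):
--     """
--     Compute the distance between the first and last occurrence of a given value
--     in terms of elements outside the range between them.
--
--     The distance is defined as:
--         number of elements before the first occurrence of num + number of elements after the last occurrence of num
--
--     Args:
--         lst: A list of values.
--         num: The value to search for in lst.
--
--     Returns:
--         int: The calculated distance as defined above, or -1 if num does not appear in lst.
--     """
--     left_distance = -1
--     right_distance = -1
--     i = 0
--     for n in lst:
--         if n == num:
--             if left_distance < 0:
--                 left_distance = i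
--             right_distance = (len(lst) - 1) - i
--
--         i += 1
--     if left_distance < 0:
--         return -1
--     return left_distance + right_distance
-- ===== SOURCE B (Python) =====
-- def num_distance(lst, num):
--     # Guard, then two independent scans: forward index of the first occurrence
--     # plus reverse index of the last occurrence (= elements after it).
--     if num not in lst:
--         return -1
--     first = lst.index(num)
--     rev = lst[::-1].index(num)
--     return first + rev
-- ===== Notes on version B (the rewrite author's own statement) =====
-- stated objective: simpler
-- what changed: Replaces A's single stateful pass (tracking left/right distances and a manual counter) with a guard plus two index scans: lst.index(num) and lst[::-1].index(num), summed directly.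
import Mathlib
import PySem

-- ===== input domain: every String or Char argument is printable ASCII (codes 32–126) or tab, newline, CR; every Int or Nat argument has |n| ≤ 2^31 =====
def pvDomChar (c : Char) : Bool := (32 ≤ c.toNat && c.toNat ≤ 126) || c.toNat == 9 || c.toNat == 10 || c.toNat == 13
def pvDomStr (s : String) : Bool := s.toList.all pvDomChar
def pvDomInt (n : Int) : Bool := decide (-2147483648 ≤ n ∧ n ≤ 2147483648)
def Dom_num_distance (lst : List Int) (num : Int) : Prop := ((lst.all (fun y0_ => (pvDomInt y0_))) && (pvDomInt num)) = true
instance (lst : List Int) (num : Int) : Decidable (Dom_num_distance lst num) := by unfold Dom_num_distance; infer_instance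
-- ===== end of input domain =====

-- B replaces A's single stateful pass with a guard plus two index scans (forward and on the reversed list); objective: simpler.

-- ===== PORT A =====
-- state = (left_distance, right_distance, i); n = len(lst), fixed before the loop
def aStep (n num : Int) (st : Int × Int × Int) (x : Int) : Int × Int × Int :=
  if x = num then
    ((if st.1 < 0 then st.2.2 else st.1), (n - 1) - st.2.2, st.2.2 + 1)
  else (st.1, st.2.1, st.2.2 + 1)

def num_distance (lst : List Int) (num : Int) : Int :=
  let st := lst.foldl (aStep (lst.length : Int) num) (-1, -1, 0)
  if st.1 < 0 then -1 else st.1 + st.2.1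

-- ===== PORT B =====
-- lst[::-1] is lst.reverse (PySem.List.slice?_none_none_neg_one); .index is PySem.List.index?,
-- guarded by membership so it never raises (getD 0 is unreachable).
def num_distance_alt (lst : List Int) (num : Int) : Int :=
  if lst.contains num then
    (((PySem.List.index? lst num).getD 0 : Nat) : Int)
      + (((PySem.List.index? lst.reverse num).getD 0 : Nat) : Int)
  else -1

-- ===== PRECONDITION & SPEC =====
def Spec_num_distance (lst : List Int) (num : Int) (out : Int) : Prop := out = num_distance_alt lst num
instance (lst : List Int) (num : Int) (out : Int) : Decidable (Spec_num_distance lst num out) := by unfold Spec_num_distance; infer_instance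

-- ===== CLAIM (what is proved, stated in full; the proofs are below) =====
def Claim_equal_num_distance : Prop := ∀ (lst : List Int) (num : Int), Dom_num_distance lst num → Spec_num_distance lst num (num_distance lst num)

-- ===== LEMMAS AND PROOFS =====

theorem loop_not_mem (n num : Int) (lst : List Int) (h : num ∉ lst) (l r i : Int) :
    lst.foldl (aStep n num) (l, r, i) = (l, r, i + (lst.length : Int)) := by
  induction lst generalizing i with
  | nil => simp
  | cons x xs ih =>
    have hx : x ≠ num := by intro he; exact h (he ▸ List.mem_cons_self)
    have hm : num ∉ xs := fun hmem => h (List.mem_cons_of_mem _ hmem)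
    simp only [List.foldl_cons, aStep, if_neg hx]
    rw [ih hm]
    refine Prod.ext rfl (Prod.ext rfl ?_)
    simp only [List.length_cons]
    push_cast
    omega

theorem loop_mem (n num : Int) (lst : List Int) (h : num ∈ lst) (l r i : Int) (hi : 0 ≤ i) :
    lst.foldl (aStep n num) (l, r, i) =
      ((if l < 0 then i + (((PySem.List.index? lst num).getD 0 : Nat) : Int) else l),
       (n - 1) - (i + ((lst.length : Int) - 1 - (((PySem.List.index? lst.reverse num).getD 0 : Nat) : Int))),
       i + (lst.length : Int)) := by
  induction lst generalizing l r i with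
  | nil => simp at h
  | cons x xs ih =>
    by_cases hx : x = num
    · subst hx
      simp only [List.foldl_cons, aStep, if_true]
      rw [PySem.List.index?_cons_self]
      by_cases hm : x ∈ xs
      · rw [ih hm _ _ _ (by omega)]
        obtain ⟨kr, hkr⟩ := Option.isSome_iff_exists.mp
          ((PySem.List.index?_isSome_iff (xs := xs.reverse) (v := x)).2 (List.mem_reverse.2 hm))
        have hrev : PySem.List.index? (x :: xs).reverse x = some kr := by
          rw [List.reverse_cons, PySem.List.index?_append_of_mem _ (List.mem_reverse.2 hm), hkr]
        rw [hrev, hkr]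
        refine Prod.ext ?_ (Prod.ext ?_ ?_) <;> simp only [Option.getD_some, List.length_cons] <;>
          (try split_ifs) <;> push_cast <;> omega
      · rw [loop_not_mem n x xs hm]
        have hrev : PySem.List.index? (x :: xs).reverse x = some xs.reverse.length := by
          rw [List.reverse_cons]
          exact PySem.List.index?_append_singleton_self _ _ (fun hc => hm (List.mem_reverse.1 hc))
        rw [hrev]
        refine Prod.ext ?_ (Prod.ext ?_ ?_) <;>
          simp only [Option.getD_some, List.length_reverse, List.length_cons] <;>
          (try split_ifs) <;> push_cast <;> omega
    · have hm : num ∈ xs := by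
        rcases List.mem_cons.1 h with he | hmem
        · exact absurd he.symm hx
        · exact hmem
      simp only [List.foldl_cons, aStep, if_neg hx]
      rw [ih hm _ _ _ (by omega)]
      obtain ⟨kf, hkf⟩ := Option.isSome_iff_exists.mp
        ((PySem.List.index?_isSome_iff (xs := xs) (v := num)).2 hm)
      obtain ⟨kr, hkr⟩ := Option.isSome_iff_exists.mp
        ((PySem.List.index?_isSome_iff (xs := xs.reverse) (v := num)).2 (List.mem_reverse.2 hm))
      have hcons : PySem.List.index? (x :: xs) num = some (kf + 1) := by
        rw [PySem.List.index?_cons_of_ne _ hx, hkf]; rfl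
      have hrev : PySem.List.index? (x :: xs).reverse num = some kr := by
        rw [List.reverse_cons, PySem.List.index?_append_of_mem _ (List.mem_reverse.2 hm), hkr]
      rw [hcons, hrev, hkf, hkr]
      refine Prod.ext ?_ (Prod.ext ?_ ?_) <;> simp only [Option.getD_some, List.length_cons] <;>
        (try split_ifs) <;> push_cast <;> omega

-- ===== VERDICT (by name: the statement is the Claim_ definition above) =====
theorem num_distance_spec : Claim_equal_num_distance := by
  intro lst num _
  unfold Spec_num_distance num_distance num_distance_alt
  by_cases h : num ∈ lst
  · rw [loop_mem (lst.length : Int) num lst h (-1) (-1) 0 le_rfl]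
    obtain ⟨kf, hkf⟩ := Option.isSome_iff_exists.mp
      ((PySem.List.index?_isSome_iff (xs := lst) (v := num)).2 h)
    obtain ⟨kr, hkr⟩ := Option.isSome_iff_exists.mp
      ((PySem.List.index?_isSome_iff (xs := lst.reverse) (v := num)).2 (List.mem_reverse.2 h))
    have hc : lst.contains num = true := List.contains_iff_mem.2 h
    rw [hkf, hkr]
    simp only [Option.getD_some, hc, if_true]
    split_ifs <;> omega
  · have hc : lst.contains num = false := by simpa using h
    rw [loop_not_mem (lst.length : Int) num lst h]
    simp [h]
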